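-- pv_equiv track=rewrite | github.com/izamzam2020/python-sensitive-file-and-directory-scanner | app.py | is_sensitive_directory
-- ===== SOURCE A (Python) =====
-- SENSITIVE_DIRECTORIES = [
--     "admin", "administrator", "admin1", "admin2", "admin_area", "admin_panel",
--     "admin/login", "adminconsole", "admincontrol", "cpanel", "backend", "admincp",
--     "admin-console", "cmsadmin", "root", "superuser", "system_admin", "dashboard",
--     "backup", "backups", "db_backup", "site-backup", "website_backup",
--     "uploads", "upload", "tmp", "temp", "files", "public_files", "private_files",
--     "secret", "private", "old_site", "bk", "old", "archive",
--     "logs", "log", "debug", "error", "access", "server",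
--     "config", "configuration", "settings", "env", "environment",
--     "database", "db", "mysql", "sql", "dump", "data",
--     "git", "svn", "hg", "bzr", "cvs",
--     "test", "tests", "testing", "dev", "development", "staging", "sandbox", "demo",
--     "example", "examples", "docs", "documentation", "doc",
--     "wp-admin", "wp-content", "joomla", "drupal", "magento", "prestashop",
--     "img", "images", "img/", "images/","bk", "bk/", "backup", "backup/", "backups", "backups/",
--     # Modern frameworks and package dirs
--     "storage", "storage/logs", "storage/app", "storage/framework", "bootstrap/cache",
--     "var", "var/log",
--     "vendor", "node_modules",
--     # Admin tools
--     "phpmyadmin", "phppgadmin", "_debugbar",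
--     # Well-known endpoints folder
--     ".well-known"
-- ]
--
-- def is_sensitive_directory(path: str) -> bool:
--     """Check if a path represents a sensitive directory that should not be publicly accessible"""
--     # Remove leading/trailing slashes and get the directory name
--     clean_path = path.strip('/')
--
--     # Check if it's in our sensitive directories list
--     if clean_path in SENSITIVE_DIRECTORIES:
--         return True
--
--     # Also check if it starts with any sensitive directory (for nested paths)
--     for sensitive_dir in SENSITIVE_DIRECTORIES:
--         if clean_path.startswith(sensitive_dir + '/') or clean_path == sensitive_dir:
--             return True
--
--     return False
-- ===== SOURCE B (Python) =====
-- _SENSITIVE_WORDS = (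
--     "admin administrator admin1 admin2 admin_area admin_panel "
--     "admin/login adminconsole admincontrol cpanel backend admincp "
--     "admin-console cmsadmin root superuser system_admin dashboard "
--     "backup backups db_backup site-backup website_backup "
--     "uploads upload tmp temp files public_files private_files "
--     "secret private old_site bk old archive "
--     "logs log debug error access server "
--     "config configuration settings env environment "
--     "database db mysql sql dump data "
--     "git svn hg bzr cvs "
--     "test tests testing dev development staging sandbox demo "
--     "example examples docs documentation doc "
--     "wp-admin wp-content joomla drupal magento prestashop "
--     "img images img/ images/ bk bk/ backup backup/ backups backups/ "
--     "storage storage/logs storage/app storage/framework bootstrap/cache "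
--     "var var/log "
--     "vendor node_modules "
--     "phpmyadmin phppgadmin _debugbar "
--     ".well-known"
-- )
--
-- _SENSITIVE_SET = set(_SENSITIVE_WORDS.split())
--
-- def is_sensitive_directory(path: str) -> bool:
--     """One left-to-right scan of the cleaned path: test each segment-boundary prefix against a set."""
--     clean = path.strip('/')
--     prefix = ""
--     for ch in clean:
--         if ch == '/':
--             if prefix in _SENSITIVE_SET:
--                 return True
--         prefix += ch
--     return prefix in _SENSITIVE_SET
-- ===== Notes on version B (the rewrite author's own statement) =====
-- stated objective: alternative
-- what changed: Instead of scanning the SENSITIVE_DIRECTORIES list and calling startswith for every entry, B makes one left-to-right pass over the cleaned path and tests each segment-boundary prefix for membership in a set built once by splitting a whitespace-separated word table.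
import Mathlib
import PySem

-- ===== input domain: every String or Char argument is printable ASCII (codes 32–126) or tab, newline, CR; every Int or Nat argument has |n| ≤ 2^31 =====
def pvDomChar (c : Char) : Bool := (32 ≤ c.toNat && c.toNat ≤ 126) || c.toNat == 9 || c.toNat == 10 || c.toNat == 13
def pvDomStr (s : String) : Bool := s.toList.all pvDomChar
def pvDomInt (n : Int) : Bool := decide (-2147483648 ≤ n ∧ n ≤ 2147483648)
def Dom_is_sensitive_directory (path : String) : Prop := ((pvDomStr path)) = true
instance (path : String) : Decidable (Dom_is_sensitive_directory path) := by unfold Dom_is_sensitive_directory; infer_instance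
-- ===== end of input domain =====

-- ===== PORT A =====
-- B replaces A's scan of the whole SENSITIVE_DIRECTORIES list (startswith per entry) by a single
-- left-to-right scan of the path testing each segment-boundary prefix against a set built once
-- from a whitespace-separated word table (objective: alternative; same measured speed).

-- the module constant SENSITIVE_DIRECTORIES (as lists of chars; duplicates kept as in the source)
def SENSITIVE_DIRECTORIES : List (List Char) :=
  ["admin".toList, "administrator".toList, "admin1".toList, "admin2".toList, "admin_area".toList, "admin_panel".toList,
   "admin/login".toList, "adminconsole".toList, "admincontrol".toList, "cpanel".toList, "backend".toList, "admincp".toList,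
   "admin-console".toList, "cmsadmin".toList, "root".toList, "superuser".toList, "system_admin".toList, "dashboard".toList,
   "backup".toList, "backups".toList, "db_backup".toList, "site-backup".toList, "website_backup".toList,
   "uploads".toList, "upload".toList, "tmp".toList, "temp".toList, "files".toList, "public_files".toList, "private_files".toList,
   "secret".toList, "private".toList, "old_site".toList, "bk".toList, "old".toList, "archive".toList,
   "logs".toList, "log".toList, "debug".toList, "error".toList, "access".toList, "server".toList,
   "config".toList, "configuration".toList, "settings".toList, "env".toList, "environment".toList,
   "database".toList, "db".toList, "mysql".toList, "sql".toList, "dump".toList, "data".toList,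
   "git".toList, "svn".toList, "hg".toList, "bzr".toList, "cvs".toList,
   "test".toList, "tests".toList, "testing".toList, "dev".toList, "development".toList, "staging".toList, "sandbox".toList, "demo".toList,
   "example".toList, "examples".toList, "docs".toList, "documentation".toList, "doc".toList,
   "wp-admin".toList, "wp-content".toList, "joomla".toList, "drupal".toList, "magento".toList, "prestashop".toList,
   "img".toList, "images".toList, "img/".toList, "images/".toList, "bk".toList, "bk/".toList, "backup".toList, "backup/".toList, "backups".toList, "backups/".toList,
   "storage".toList, "storage/logs".toList, "storage/app".toList, "storage/framework".toList, "bootstrap/cache".toList,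
   "var".toList, "var/log".toList,
   "vendor".toList, "node_modules".toList,
   "phpmyadmin".toList, "phppgadmin".toList, "_debugbar".toList,
   ".well-known".toList]

def is_sensitive_directory (path : String) : Bool :=
  let clean := PySem.Chars.stripChars path.toList "/".toList
  if SENSITIVE_DIRECTORIES.contains clean then true
  else SENSITIVE_DIRECTORIES.any (fun d =>
    PySem.Chars.startswith clean (d ++ ['/']) || clean == d)

-- ===== PORT B =====
-- _SENSITIVE_WORDS: one whitespace-separated word table, as in Source B
def sensWords : List Char :=
  ("admin administrator admin1 admin2 admin_area admin_panel " ++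
   "admin/login adminconsole admincontrol cpanel backend admincp " ++
   "admin-console cmsadmin root superuser system_admin dashboard " ++
   "backup backups db_backup site-backup website_backup " ++
   "uploads upload tmp temp files public_files private_files " ++
   "secret private old_site bk old archive " ++
   "logs log debug error access server " ++
   "config configuration settings env environment " ++
   "database db mysql sql dump data " ++
   "git svn hg bzr cvs " ++
   "test tests testing dev development staging sandbox demo " ++
   "example examples docs documentation doc " ++
   "wp-admin wp-content joomla drupal magento prestashop " ++
   "img images img/ images/ bk bk/ backup backup/ backups backups/ " ++
   "storage storage/logs storage/app storage/framework bootstrap/cache " ++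
   "var var/log " ++
   "vendor node_modules " ++
   "phpmyadmin phppgadmin _debugbar " ++
   ".well-known").toList

-- _SENSITIVE_SET = set(_SENSITIVE_WORDS.split())
def sensSet : PySem.Set (List Char) := PySem.Set.ofList (PySem.Chars.split₀ sensWords)

-- the 'for ch in clean' loop of Source B: pre is the prefix built so far
def altGo (pre : List Char) : List Char → Bool
  | [] => PySem.Set.contains sensSet pre
  | c :: rest =>
      if c = '/' then
        if PySem.Set.contains sensSet pre then true else altGo (pre ++ [c]) rest
      else altGo (pre ++ [c]) rest

def is_sensitive_directory_alt (path : String) : Bool :=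
  altGo [] (PySem.Chars.stripChars path.toList "/".toList)

-- ===== PRECONDITION & SPEC =====
def Spec_is_sensitive_directory (path : String) (out : Bool) : Prop := out = is_sensitive_directory_alt path
instance (path : String) (out : Bool) : Decidable (Spec_is_sensitive_directory path out) := by unfold Spec_is_sensitive_directory; infer_instance

-- ===== CLAIM (what is proved, stated in full; the proofs are below) =====
def Claim_equal_is_sensitive_directory : Prop := ∀ (path : String), Dom_is_sensitive_directory path → Spec_is_sensitive_directory path (is_sensitive_directory path)

-- ===== LEMMAS AND PROOFS =====

set_option maxRecDepth 40000 in
set_option maxHeartbeats 2000000 in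
lemma split_sensWords : PySem.Chars.split₀ sensWords = SENSITIVE_DIRECTORIES := by decide

lemma contains_sens (pre : List Char) :
    sensSet.contains pre = true ↔ pre ∈ SENSITIVE_DIRECTORIES := by
  rw [show sensSet = PySem.Set.ofList (PySem.Chars.split₀ sensWords) from rfl,
    split_sensWords, PySem.Set.contains_iff, PySem.Set.mem_ofList]

-- characterization of B's scan: it finds a member of the set among pre ++ (segment-boundary prefixes of suffix)
lemma altGo_iff (suffix : List Char) : ∀ pre : List Char,
    altGo pre suffix = true ↔
      (∃ u v, suffix = u ++ '/' :: v ∧ (pre ++ u) ∈ SENSITIVE_DIRECTORIES) ∨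
        (pre ++ suffix) ∈ SENSITIVE_DIRECTORIES := by
  induction suffix with
  | nil =>
      intro pre
      simp only [altGo]
      rw [contains_sens]
      simp
  | cons c rest ih =>
      intro pre
      by_cases hc : c = '/'
      · subst hc
        by_cases hpre : pre ∈ SENSITIVE_DIRECTORIES
        · simp only [altGo, if_true]
          rw [if_pos ((contains_sens pre).mpr hpre)]
          constructor
          · intro _; exact Or.inl ⟨[], rest, by simp, by simpa using hpre⟩
          · intro _; rfl
        · simp only [altGo, if_true]
          rw [if_neg (fun h => hpre ((contains_sens pre).mp h))]
          rw [ih (pre ++ ['/'])]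
          constructor
          · rintro (⟨u, v, hrest, hmem⟩ | hmem)
            · exact Or.inl ⟨'/' :: u, v, by simp [hrest], by simpa using hmem⟩
            · exact Or.inr (by simpa using hmem)
          · rintro (⟨u, v, hsuf, hmem⟩ | hmem)
            · cases u with
              | nil => exact absurd (by simpa using hmem) hpre
              | cons a u' =>
                  simp only [List.cons_append, List.cons.injEq] at hsuf
                  exact Or.inl ⟨u', v, hsuf.2, by simpa [← hsuf.1] using hmem⟩
            · exact Or.inr (by simpa using hmem)
      · simp only [altGo, if_neg hc]
        rw [ih (pre ++ [c])]
        constructor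
        · rintro (⟨u, v, hrest, hmem⟩ | hmem)
          · exact Or.inl ⟨c :: u, v, by simp [hrest], by simpa using hmem⟩
          · exact Or.inr (by simpa using hmem)
        · rintro (⟨u, v, hsuf, hmem⟩ | hmem)
          · cases u with
            | nil => simp at hsuf; exact absurd hsuf.1 hc
            | cons a u' =>
                simp only [List.cons_append, List.cons.injEq] at hsuf
                exact Or.inl ⟨u', v, hsuf.2, by simpa [← hsuf.1] using hmem⟩
          · exact Or.inr (by simpa using hmem)

-- characterization of A's loop body over an arbitrary cleaned path
lemma aLoop_iff (cs : List Char) :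
    (SENSITIVE_DIRECTORIES.any (fun d =>
        PySem.Chars.startswith cs (d ++ ['/']) || cs == d)) = true ↔
      (∃ u v, cs = u ++ '/' :: v ∧ u ∈ SENSITIVE_DIRECTORIES) ∨ cs ∈ SENSITIVE_DIRECTORIES := by
  rw [List.any_eq_true]
  constructor
  · rintro ⟨d, hd, hf⟩
    rcases Bool.or_eq_true_iff.mp hf with h | h
    · rcases (PySem.Chars.startswith_iff _ _).mp h with ⟨v, hv⟩
      exact Or.inl ⟨d, v, by simpa using hv.symm, hd⟩
    · exact Or.inr (by simpa [eq_comm] using (beq_iff_eq.mp h) ▸ hd)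
  · rintro (⟨u, v, hcs, hu⟩ | hmem)
    · exact ⟨u, hu, Bool.or_eq_true_iff.mpr (Or.inl ((PySem.Chars.startswith_iff _ _).mpr ⟨v, by simp [hcs]⟩))⟩
    · exact ⟨cs, hmem, Bool.or_eq_true_iff.mpr (Or.inr (beq_self_eq_true cs))⟩

-- A's redundant initial membership test collapses into the loop
lemma a_eq_loop (cs : List Char) :
    (if SENSITIVE_DIRECTORIES.contains cs then true
     else SENSITIVE_DIRECTORIES.any (fun d =>
        PySem.Chars.startswith cs (d ++ ['/']) || cs == d)) =
    SENSITIVE_DIRECTORIES.any (fun d =>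
        PySem.Chars.startswith cs (d ++ ['/']) || cs == d) := by
  split_ifs with h
  · exact ((aLoop_iff cs).mpr (Or.inr (by simpa using h))).symm
  · rfl


-- ===== VERDICT (by name: the statement is the Claim_ definition above) =====
theorem is_sensitive_directory_spec : Claim_equal_is_sensitive_directory := by
  intro path _
  unfold Spec_is_sensitive_directory is_sensitive_directory is_sensitive_directory_alt
  set cs := PySem.Chars.stripChars path.toList "/".toList with hcs
  rw [a_eq_loop cs]
  exact Bool.coe_iff_coe.mp ((aLoop_iff cs).trans ((altGo_iff cs []).symm.trans (by simp)))
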